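-- pv_equiv track=rewrite | github.com/SmileyChris/addventure | src/addventure/compiler.py | _generate_sealed_refs
-- ===== SOURCE A (Python) =====
-- _GREEK_LETTERS = [
--     "Alpha", "Beta", "Gamma", "Delta", "Epsilon", "Zeta", "Eta", "Theta",
--     "Iota", "Kappa", "Lambda", "Mu", "Nu", "Xi", "Omicron", "Pi", "Rho",
--     "Sigma", "Tau", "Upsilon", "Phi", "Chi", "Psi", "Omega",
-- ]
--
-- def _generate_sealed_refs(count: int) -> list[str]:
--     """Generate sequential Greek letter reference codes for sealed texts."""
--     refs = []
--     for i in range(count):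
--         letter = _GREEK_LETTERS[i % len(_GREEK_LETTERS)]
--         cycle = i // len(_GREEK_LETTERS)
--         ref = f"{letter}-{cycle + 1}" if cycle > 0 else letter
--         refs.append(ref)
--     return refs
-- ===== SOURCE B (Python) =====
-- _GREEK_LETTERS = [
--     "Alpha", "Beta", "Gamma", "Delta", "Epsilon", "Zeta", "Eta", "Theta",
--     "Iota", "Kappa", "Lambda", "Mu", "Nu", "Xi", "Omicron", "Pi", "Rho",
--     "Sigma", "Tau", "Upsilon", "Phi", "Chi", "Psi", "Omega",
-- ]
--
--
-- def _generate_sealed_refs(count: int) -> list[str]: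
--     """Generate sequential Greek letter reference codes for sealed texts."""
--     refs = []
--     cycle = 0
--     remaining = count
--     while remaining > 0:
--         suffix = "" if cycle == 0 else f"-{cycle + 1}"
--         refs.extend(letter + suffix for letter in _GREEK_LETTERS[:remaining])
--         remaining -= len(_GREEK_LETTERS)
--         cycle += 1
--     return refs
-- ===== Notes on version B (the rewrite author's own statement) =====
-- stated objective: alternative
-- what changed: Replaces the per-index modulus/floor-division arithmetic loop with an outer while-loop over cycles that computes the suffix once per cycle and appends a whole sliced block of the Greek-letter list per iteration.
import Mathlib
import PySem

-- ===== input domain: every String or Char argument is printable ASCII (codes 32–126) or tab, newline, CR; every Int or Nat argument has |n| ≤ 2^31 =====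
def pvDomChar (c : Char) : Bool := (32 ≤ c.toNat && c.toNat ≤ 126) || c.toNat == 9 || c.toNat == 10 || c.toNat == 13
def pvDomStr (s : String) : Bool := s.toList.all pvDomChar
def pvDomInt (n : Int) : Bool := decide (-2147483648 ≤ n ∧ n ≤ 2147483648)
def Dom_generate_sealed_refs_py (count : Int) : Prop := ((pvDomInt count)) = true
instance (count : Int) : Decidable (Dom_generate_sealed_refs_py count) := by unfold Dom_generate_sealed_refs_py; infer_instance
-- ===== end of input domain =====

-- B replaces A's per-index modulus/floor-division arithmetic with an outer loop over cycles that
-- computes the suffix once per cycle and appends a sliced block of letters per iteration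
-- (alternative decomposition; same asymptotic cost).

-- ===== PORT A =====
-- _GREEK_LETTERS (module constant, shared by both ports)
def pvGreek : List String :=
  ["Alpha", "Beta", "Gamma", "Delta", "Epsilon", "Zeta", "Eta", "Theta",
   "Iota", "Kappa", "Lambda", "Mu", "Nu", "Xi", "Omicron", "Pi", "Rho",
   "Sigma", "Tau", "Upsilon", "Phi", "Chi", "Psi", "Omega"]

-- literal port of A: for i in range(count): refs.append(...)
-- (i % 24 is always in range 0..23, so the pyGetD default "" is never used)
def generate_sealed_refs_py (count : Int) : List String :=
  (PySem.List.pyRange 0 count 1).foldl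
    (fun refs i =>
      let letter := PySem.List.pyGetD pvGreek (PySem.Int.mod i (pvGreek.length : Int)) ""
      let cycle := PySem.Int.floordiv i (pvGreek.length : Int)
      let ref := if cycle > 0 then letter ++ "-" ++ PySem.Int.toStr (cycle + 1) else letter
      refs ++ [ref])
    []

-- ===== PORT B =====
-- literal port of B's while-loop: state (refs, cycle, remaining)
def pvAltLoop (refs : List String) (cycle : Nat) (remaining : Int) : List String :=
  if _h : remaining > 0 then
    let suffix := if cycle = 0 then "" else "-" ++ PySem.Int.toStr ((cycle : Int) + 1)
    pvAltLoop (refs ++ (PySem.List.slice pvGreek none (some remaining)).map (· ++ suffix))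
      (cycle + 1) (remaining - (pvGreek.length : Int))
  else refs
termination_by remaining.toNat
decreasing_by simp only [show pvGreek.length = 24 from rfl]; omega

def generate_sealed_refs_py_alt (count : Int) : List String :=
  pvAltLoop [] 0 count

-- ===== PRECONDITION & SPEC =====
def Spec_generate_sealed_refs_py (count : Int) (out : List String) : Prop := out = generate_sealed_refs_py_alt count
instance (count : Int) (out : List String) : Decidable (Spec_generate_sealed_refs_py count out) := by unfold Spec_generate_sealed_refs_py; infer_instance

-- ===== CLAIM (what is proved, stated in full; the proofs are below) =====
def Claim_equal_generate_sealed_refs_py : Prop := ∀ (count : Int), Dom_generate_sealed_refs_py count → Spec_generate_sealed_refs_py count (generate_sealed_refs_py count)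

-- ===== LEMMAS AND PROOFS =====

-- the common i-th reference, as a function of the natural index
def pvRef (i : Nat) : String :=
  if i / 24 = 0 then pvGreek.getD (i % 24) ""
  else pvGreek.getD (i % 24) "" ++ "-" ++ PySem.Int.toStr (((i / 24 : Nat) : Int) + 1)

theorem pvGreek_length : pvGreek.length = 24 := by decide

-- A's loop body at a natural index computes pvRef
theorem pvBodyA_eq (k : Nat) :
    (if PySem.Int.floordiv (k : Int) (pvGreek.length : Int) > 0 then
       PySem.List.pyGetD pvGreek (PySem.Int.mod (k : Int) (pvGreek.length : Int)) "" ++ "-" ++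
         PySem.Int.toStr (PySem.Int.floordiv (k : Int) (pvGreek.length : Int) + 1)
     else PySem.List.pyGetD pvGreek (PySem.Int.mod (k : Int) (pvGreek.length : Int)) "") = pvRef k := by
  have hmod : PySem.Int.mod (k : Int) (pvGreek.length : Int) = ((k % 24 : Nat) : Int) := by
    simp [PySem.Int.mod, Int.fmod_eq_emod, pvGreek_length]
  have hdiv : PySem.Int.floordiv (k : Int) (pvGreek.length : Int) = ((k / 24 : Nat) : Int) := by
    simp [PySem.Int.floordiv, Int.fdiv_eq_ediv, pvGreek_length]
  rw [hmod, hdiv]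
  unfold pvRef
  rcases Nat.eq_zero_or_pos (k / 24) with h | h
  · rw [if_neg (by omega : ¬ (((k / 24 : Nat) : Int) > 0)), if_pos h]
    simp only [PySem.List.pyGetD_natCast]
  · rw [if_pos (by omega : ((k / 24 : Nat) : Int) > 0), if_neg (by omega : ¬ k / 24 = 0)]
    simp only [PySem.List.pyGetD_natCast]

theorem pvA_eq_map (count : Int) :
    generate_sealed_refs_py count = (List.range count.toNat).map pvRef := by
  unfold generate_sealed_refs_py
  rw [PySem.List.pyRange_one, List.foldl_map, PySem.List.foldl_append_singleton_eq_map,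
      List.nil_append, Int.sub_zero]
  refine List.map_congr_left fun k _ => ?_
  simpa using pvBodyA_eq k

-- pvRef on cycle c, position i < 24: letter plus the cycle suffix
theorem pvRef_split (c i : Nat) (hi : i < 24) :
    pvRef (24 * c + i) =
      pvGreek.getD i "" ++ (if c = 0 then "" else "-" ++ PySem.Int.toStr ((c : Int) + 1)) := by
  have hmod : (24 * c + i) % 24 = i := by omega
  have hdiv : (24 * c + i) / 24 = c := by omega
  unfold pvRef
  rw [hmod, hdiv]
  by_cases hc : c = 0
  · simp [hc, String.append_empty]
  · simp [hc, String.append_assoc]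

-- the block appended in one cycle of B's loop is the corresponding segment of pvRef values
theorem pvBlock_eq (c : Nat) (m : Nat) (hm : m ≤ 24) :
    (pvGreek.take m).map
        (· ++ if c = 0 then "" else "-" ++ PySem.Int.toStr ((c : Int) + 1)) =
      (List.range m).map (fun j => pvRef (24 * c + j)) := by
  apply List.ext_getElem
  · simp [pvGreek_length, hm]
  · intro i h1 h2
    have hi : i < m := by simpa [pvGreek_length, hm] using h1
    have hi24 : i < 24 := lt_of_lt_of_le hi hm
    simp only [List.getElem_map, List.getElem_range, List.getElem_take]
    rw [pvRef_split c i hi24,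
        List.getD_eq_getElem pvGreek "" (by rw [pvGreek_length]; exact hi24)]

-- B's loop, started at cycle c with remaining r, appends the refs indexed 24c, 24c+1, …
theorem pvAltLoop_eq (refs : List String) (c : Nat) (r : Int) :
    pvAltLoop refs c r = refs ++ (List.range r.toNat).map (fun j => pvRef (24 * c + j)) := by
  induction refs, c, r using pvAltLoop.induct with
  | case1 refs c r hr suffix IH =>
    rw [pvAltLoop, dif_pos hr]
    have hsuf : suffix = if c = 0 then "" else "-" ++ PySem.Int.toStr ((c : Int) + 1) := rfl
    rw [hsuf] at IH
    rw [IH]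
    have h0 : (0 : Int) ≤ r := le_of_lt hr
    rw [PySem.List.slice_to _ h0]
    simp only [pvGreek_length, Nat.cast_ofNat] at IH ⊢
    by_cases h24 : (24 : Int) ≤ r
    · have hsplit : r.toNat = 24 + (r - 24).toNat := by omega
      have htake : pvGreek.take r.toNat = pvGreek.take 24 := by
        rw [List.take_of_length_le (by rw [pvGreek_length]; omega),
            List.take_of_length_le (by rw [pvGreek_length])]
      rw [htake, hsplit, List.range_add, List.map_append, List.map_map,
          pvBlock_eq c 24 le_rfl, List.append_assoc]
      congr 1
      congr 1
      refine List.map_congr_left fun j _ => ?_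
      simp only [Function.comp]
      congr 1
      ring
    · have hz : (r - 24).toNat = 0 := by omega
      rw [hz, pvBlock_eq c r.toNat (by omega)]
      simp
  | case2 refs c r hr =>
    rw [pvAltLoop, dif_neg hr]
    have hz : r.toNat = 0 := by omega
    simp [hz]

theorem pvB_eq_map (count : Int) :
    generate_sealed_refs_py_alt count = (List.range count.toNat).map pvRef := by
  unfold generate_sealed_refs_py_alt
  rw [pvAltLoop_eq]
  simp

-- ===== VERDICT (by name: the statement is the Claim_ definition above) =====
theorem generate_sealed_refs_py_spec : Claim_equal_generate_sealed_refs_py := by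
  intro count _
  unfold Spec_generate_sealed_refs_py
  rw [pvA_eq_map, pvB_eq_map]
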